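-- pv_equiv track=rewrite | github.com/pypi-data/pypi-mirror-66 | packages/readme-md-docstrings/readme_md_docstrings-0.0.13-py3-none-any.whl/readme_md_docstrings.py | _get_sub_section_ranges
-- ===== SOURCE A (Python) =====
-- from typing import Iterable, List, Optional, Sequence, Tuple
--
-- def _get_header_level(header: str) -> int:
--     header_level: int = 0
--     character: str
--     for character in header:
--         if character == '#':
--             header_level += 1
--         else:
--             break
--     return header_level
--
-- def _get_sub_section_ranges(
--     lines: Sequence[str],
--     header_level: int
-- ) -> List[Tuple[int, int]]:
--     assert lines
--     in_code_block: bool = False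
--     sub_section_ranges: List[Tuple[int, int]] = []
--     line: str
--     start: int = 0
--     index: int = 0
--     for index, line in enumerate(lines, 0):
--         # Identify whether we are inside a code block
--         if (
--             # We were not *already* within a code block
--             (not in_code_block) and
--             # This line opens a code block
--             line.lstrip().startswith('```') and
--             # This line does not also close that code block
--             len(line.split('```')) == 2
--         ):
--             # We started a new code block
--             in_code_block = True
--         elif in_code_block and len(line.split('```')) == 2:
--             # We've ended a code block
--             in_code_block = False
--         # Only examine lines which are *not* within code blocks,
--         # and which are *not* part of the top-level header
--         if (not in_code_block) and index:
--             line_header_level: int = _get_header_level(line)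
--             if line_header_level == header_level:
--                 sub_section_ranges.append((start, index))
--                 start = index
--             else:
--                 # We shouldn't have any lower-level headers...
--                 assert (
--                     line_header_level == 0 or
--                     line_header_level > header_level
--                 )
--     # if start != index:
--     sub_section_ranges.append((start, index + 1))
--     return sub_section_ranges
-- ===== SOURCE B (Python) =====
-- def _get_header_level(header):
--     header_level = 0
--     for character in header:
--         if character == '#':
--             header_level += 1
--         else:
--             break
--     return header_level
--
--
-- def _in_code_flags(lines):
--     # Pass 1: for each line, whether it lies inside (or on the fence of) a code block.
--     flags = []
--     in_code = False
--     for line in lines: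
--         if (not in_code) and line.lstrip().startswith('```') and len(line.split('```')) == 2:
--             in_code = True
--         elif in_code and len(line.split('```')) == 2:
--             in_code = False
--         flags.append(in_code)
--     return flags
--
--
-- def _get_sub_section_ranges(lines, header_level):
--     assert lines
--     # Pass 2: collect boundary indices, then pair up consecutive boundaries.
--     boundaries = [0]
--     for index, (line, in_code) in enumerate(zip(lines, _in_code_flags(lines))):
--         if index and not in_code:
--             level = _get_header_level(line)
--             if level == header_level:
--                 boundaries.append(index)
--             else:
--                 # We shouldn't have any lower-level headers...
--                 assert level == 0 or level > header_level
--     boundaries.append(len(lines))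
--     return list(zip(boundaries, boundaries[1:]))
-- ===== Notes on version B (the rewrite author's own statement) =====
-- stated objective: simpler
-- what changed: Replaces A's single stateful loop (which threads in_code, start and a growing range list together) by two independent passes - first compute each line's code-block flag, then collect header boundary indices - and builds the result by pairing consecutive boundaries with zip.
import Mathlib
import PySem

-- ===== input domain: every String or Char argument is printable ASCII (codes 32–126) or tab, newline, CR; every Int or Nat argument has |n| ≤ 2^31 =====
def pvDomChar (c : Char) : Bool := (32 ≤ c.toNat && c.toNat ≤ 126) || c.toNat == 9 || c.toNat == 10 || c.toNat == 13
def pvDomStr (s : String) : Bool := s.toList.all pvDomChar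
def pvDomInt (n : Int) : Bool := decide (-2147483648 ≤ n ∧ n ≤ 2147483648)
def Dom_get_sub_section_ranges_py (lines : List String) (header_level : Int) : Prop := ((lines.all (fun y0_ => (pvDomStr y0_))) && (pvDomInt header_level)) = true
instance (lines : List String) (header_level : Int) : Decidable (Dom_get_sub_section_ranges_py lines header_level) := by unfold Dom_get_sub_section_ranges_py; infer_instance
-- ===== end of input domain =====

-- B replaces A's single stateful loop by two passes (code-block flags, then boundary
-- indices) and builds the ranges by pairing consecutive boundaries; objective: simpler.

-- ===== PORT A =====
-- _get_header_level: count leading '#' characters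
def pyHeaderLevelAux : List Char → Int → Int
  | [], acc => acc
  | c :: cs, acc => if c = '#' then pyHeaderLevelAux cs (acc + 1) else acc

def pyHeaderLevel (header : String) : Int := pyHeaderLevelAux header.toList 0

-- the if/elif code-block toggle shared verbatim by A and B (split with sep ≠ "" via Chars.splitOn)
def pyCodeToggle (in_code : Bool) (line : String) : Bool :=
  if (!in_code) && PySem.Str.startswith (PySem.Str.lstrip line) "```"
      && ((PySem.Chars.splitOn line.toList "```".toList).length == 2) then true
  else if in_code && ((PySem.Chars.splitOn line.toList "```".toList).length == 2) then false
  else in_code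

-- A's loop body; state = (in_code, sub_section_ranges, start, index)
def pyStepA (header_level : Int) (st : Bool × List (Int × Int) × Int × Int)
    (p : Int × String) : Bool × List (Int × Int) × Int × Int :=
  let in_code := pyCodeToggle st.1 p.2
  if (!in_code) = true ∧ p.1 ≠ 0 then
    if pyHeaderLevel p.2 = header_level then (in_code, st.2.1 ++ [(st.2.2.1, p.1)], p.1, p.1)
    else (in_code, st.2.1, st.2.2.1, p.1)   -- assert branch (failure excluded by Pre_)
  else (in_code, st.2.1, st.2.2.1, p.1)

def get_sub_section_ranges_py (lines : List String) (header_level : Int) : List (Int × Int) :=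
  let st := (PySem.List.enumerate lines 0).foldl (pyStepA header_level)
    (false, ([] : List (Int × Int)), 0, 0)
  st.2.1 ++ [(st.2.2.1, st.2.2.2 + 1)]

-- ===== PORT B =====
-- _in_code_flags: pass 1, appending each line's flag
def pyFlags (lines : List String) : List Bool :=
  (lines.foldl (fun (st : Bool × List Bool) line =>
      let f := pyCodeToggle st.1 line
      (f, st.2 ++ [f])) (false, ([] : List Bool))).2

-- pass 2 loop body: collect header boundary indices
def pyStepB (header_level : Int) (bs : List Int) (p : Int × String × Bool) : List Int :=
  if p.1 ≠ 0 ∧ p.2.2 = false then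
    if pyHeaderLevel p.2.1 = header_level then bs ++ [p.1]
    else bs   -- assert branch (failure excluded by Pre_)
  else bs

def get_sub_section_ranges_py_alt (lines : List String) (header_level : Int) : List (Int × Int) :=
  let boundaries := (PySem.List.enumerate (lines.zip (pyFlags lines)) 0).foldl
      (pyStepB header_level) [0] ++ [(lines.length : Int)]
  boundaries.zip boundaries.tail

-- ===== PRECONDITION & SPEC =====
-- per-line code-block membership, stated as its own state machine for Pre_
def preFlags : Bool → List String → List Bool
  | _, [] => []
  | ic, l :: ls => let f := pyCodeToggle ic l; f :: preFlags f ls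

-- Pre_ excludes exactly the inputs where A raises AssertionError: the empty list, and
-- lists with a non-code-block line (after line 0) whose count of leading '#' characters
-- is strictly between 0 and header_level.  B raises there too.
def Pre_get_sub_section_ranges_py (lines : List String) (header_level : Int) : Prop :=
  lines ≠ [] ∧ ∀ p ∈ PySem.List.enumerate (lines.zip (preFlags false lines)) 0,
    p.1 ≠ 0 → p.2.2 = false →
      (((p.2.1.toList.takeWhile (· = '#')).length : Int) = header_level ∨
        (p.2.1.toList.takeWhile (· = '#')).length = 0 ∨
        header_level < ((p.2.1.toList.takeWhile (· = '#')).length : Int))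

instance (lines : List String) (header_level : Int) : Decidable (Pre_get_sub_section_ranges_py lines header_level) := by unfold Pre_get_sub_section_ranges_py; infer_instance

def pvWitness_get_sub_section_ranges_py : List String × Int :=
  (["# Title", "## a", "text", "## b"], 2)

def Spec_get_sub_section_ranges_py (lines : List String) (header_level : Int) (out : List (Int × Int)) : Prop := out = get_sub_section_ranges_py_alt lines header_level
instance (lines : List String) (header_level : Int) (out : List (Int × Int)) : Decidable (Spec_get_sub_section_ranges_py lines header_level out) := by unfold Spec_get_sub_section_ranges_py; infer_instance

-- ===== CLAIM (what is proved, stated in full; the proofs are below) =====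
def Claim_equal_get_sub_section_ranges_py : Prop := ∀ (lines : List String) (header_level : Int), Dom_get_sub_section_ranges_py lines header_level → Pre_get_sub_section_ranges_py lines header_level → Spec_get_sub_section_ranges_py lines header_level (get_sub_section_ranges_py lines header_level)

-- ===== LEMMAS AND PROOFS =====

-- final in_code state after a list of lines
def icAfter (ic : Bool) (ls : List String) : Bool := ls.foldl pyCodeToggle ic

theorem preFlags_snoc (ic : Bool) (xs : List String) (x : String) :
    preFlags ic (xs ++ [x]) = preFlags ic xs ++ [pyCodeToggle (icAfter ic xs) x] := by
  induction xs generalizing ic with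
  | nil => simp [preFlags, icAfter]
  | cons a as ih => simp [preFlags, icAfter, ih, List.foldl_cons]

theorem length_preFlags (ic : Bool) (ls : List String) :
    (preFlags ic ls).length = ls.length := by
  induction ls generalizing ic with
  | nil => rfl
  | cons a as ih => simp [preFlags, ih]

theorem pyFlags_aux (ls : List String) (ic : Bool) (acc : List Bool) :
    ls.foldl (fun (st : Bool × List Bool) line =>
      let f := pyCodeToggle st.1 line
      (f, st.2 ++ [f])) (ic, acc) = (icAfter ic ls, acc ++ preFlags ic ls) := by
  induction ls generalizing ic acc with
  | nil => simp [icAfter, preFlags]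
  | cons a as ih => simp [preFlags, icAfter, ih, List.foldl_cons]

theorem pyFlags_eq (lines : List String) : pyFlags lines = preFlags false lines := by
  simp [pyFlags, pyFlags_aux]

theorem pairs_snoc (b c : Int) (bs : List Int) :
    ((b :: bs) ++ [c]).zip (bs ++ [c]) =
      (b :: bs).zip bs ++ [(bs.getLastD b, c)] := by
  induction bs generalizing b with
  | nil => simp
  | cons b' bs' ih =>
    simp only [List.cons_append, List.zip_cons_cons, List.getLastD_cons]
    rw [← List.cons_append, ih b']

-- the main invariant connecting A's fold state to B's boundary list
theorem main_inv (hl : Int) (lines : List String) (h : lines ≠ []) :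
    ∃ tl : List Int,
      (PySem.List.enumerate (lines.zip (preFlags false lines)) 0).foldl (pyStepB hl) [0]
        = 0 :: tl ∧
      (PySem.List.enumerate lines 0).foldl (pyStepA hl) (false, ([] : List (Int × Int)), 0, 0)
        = (icAfter false lines, (0 :: tl).zip tl, tl.getLastD 0, (lines.length : Int) - 1) := by
  induction lines using List.reverseRecOn with
  | nil => exact absurd rfl h
  | append_singleton xs x ih =>
    rcases xs.eq_nil_or_concat' with rfl | hne
    · refine ⟨[], ?_, ?_⟩
      · simp [preFlags, PySem.List.enumerate, pyStepB]
      · simp [PySem.List.enumerate, pyStepA, icAfter]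
    · have hxs : xs ≠ [] := by rcases hne with ⟨ys, y, rfl⟩; simp
      obtain ⟨tl, hB, hA⟩ := ih hxs
      have hzip : (xs ++ [x]).zip (preFlags false (xs ++ [x]))
          = xs.zip (preFlags false xs) ++ [(x, pyCodeToggle (icAfter false xs) x)] := by
        rw [preFlags_snoc]
        rw [List.zip_append (by simp [length_preFlags])]
        simp
      have hlenz : (xs.zip (preFlags false xs)).length = xs.length := by
        simp [length_preFlags]
      have hlen1 : 1 ≤ xs.length := List.length_pos_iff.mpr hxs
      have hidx : ((xs.length : Int)) ≠ 0 := by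
        have : (0:Int) < (xs.length : Int) := by exact_mod_cast hlen1
        omega
      have hEB : PySem.List.enumerate ((xs ++ [x]).zip (preFlags false (xs ++ [x]))) 0
          = PySem.List.enumerate (xs.zip (preFlags false xs)) 0
            ++ [((xs.length : Int), x, pyCodeToggle (icAfter false xs) x)] := by
        rw [hzip, PySem.List.enumerate_append]
        simp [hlenz, PySem.List.enumerate]
      have hEA : PySem.List.enumerate (xs ++ [x]) 0
          = PySem.List.enumerate xs 0 ++ [((xs.length : Int), x)] := by
        rw [PySem.List.enumerate_append]; simp [PySem.List.enumerate]
      have hicA : icAfter false (xs ++ [x]) = pyCodeToggle (icAfter false xs) x := by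
        simp [icAfter]
      by_cases hc : pyCodeToggle (icAfter false xs) x = false ∧ pyHeaderLevel x = hl
      · refine ⟨tl ++ [(xs.length : Int)], ?_, ?_⟩
        · rw [hEB, List.foldl_append, hB]
          simp [pyStepB, hxs, hc.1, hc.2]
        · rw [hEA, List.foldl_append, hA]
          simp [pyStepA, hxs, hc.1, hc.2, hicA]
          rw [← List.cons_append, pairs_snoc]
          simp [List.getLastD_eq_getLast?]
      · refine ⟨tl, ?_, ?_⟩
        · rw [hEB, List.foldl_append, hB]
          by_cases hic : pyCodeToggle (icAfter false xs) x = false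
          · have hnl : pyHeaderLevel x ≠ hl := fun he => hc ⟨hic, he⟩
            simp [pyStepB, hic, hnl]
          · simp [pyStepB, hic]
        · rw [hEA, List.foldl_append, hA]
          by_cases hic : pyCodeToggle (icAfter false xs) x = false
          · have hnl : pyHeaderLevel x ≠ hl := fun he => hc ⟨hic, he⟩
            simp [pyStepA, hic, hnl, hicA]
          · simp [pyStepA, hic, hicA]

-- ===== VERDICT (by name: the statement is the Claim_ definition above) =====
theorem get_sub_section_ranges_py_spec : Claim_equal_get_sub_section_ranges_py := by
  intro lines hl _hDom hPre
  unfold Spec_get_sub_section_ranges_py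
  obtain ⟨tl, hB, hA⟩ := main_inv hl lines hPre.1
  have hlen1 : 1 ≤ lines.length := List.length_pos_iff.mpr hPre.1
  have hn : ((lines.length : Int) - 1) + 1 = (lines.length : Int) := by omega
  simp only [get_sub_section_ranges_py, get_sub_section_ranges_py_alt, pyFlags_eq, hB, hA]
  simp only [List.cons_append, List.tail_cons, hn]
  rw [← List.cons_append, pairs_snoc]
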